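-- pv_equiv track=rewrite | github.com/bscheibel/dm_eval | transparency_evaluation_github.py | find_relational_rules
-- ===== SOURCE A (Python) =====
-- def find_relational_rules(decision_rule, variable_names_used, variable_input):
--     all_variables = []
--     found = False
--     count = 0
--     for v in variable_input:
--             if v in decision_rule:
--                 count += 1
--             if count > 1:
--                 found = True
--     if found:
--         for v in variable_input:
--                 if v in decision_rule:
--                     all_variables.append(v)
--     return all_variables, bool(found)
-- ===== SOURCE B (Python) =====
-- def find_relational_rules(decision_rule, variable_names_used, variable_input):
--     matches = [v for v in variable_input if v in decision_rule]
--     if len(matches) > 1: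
--         return matches, True
--     return [], False
-- ===== Notes on version B (the rewrite author's own statement) =====
-- stated objective: simpler
-- what changed: Replaces A's two sequential loops (a counting loop with a latched flag, then a conditional second scan that rebuilds the matches) by a single comprehension collecting the matches once, returning them iff there are more than one.
import Mathlib
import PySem

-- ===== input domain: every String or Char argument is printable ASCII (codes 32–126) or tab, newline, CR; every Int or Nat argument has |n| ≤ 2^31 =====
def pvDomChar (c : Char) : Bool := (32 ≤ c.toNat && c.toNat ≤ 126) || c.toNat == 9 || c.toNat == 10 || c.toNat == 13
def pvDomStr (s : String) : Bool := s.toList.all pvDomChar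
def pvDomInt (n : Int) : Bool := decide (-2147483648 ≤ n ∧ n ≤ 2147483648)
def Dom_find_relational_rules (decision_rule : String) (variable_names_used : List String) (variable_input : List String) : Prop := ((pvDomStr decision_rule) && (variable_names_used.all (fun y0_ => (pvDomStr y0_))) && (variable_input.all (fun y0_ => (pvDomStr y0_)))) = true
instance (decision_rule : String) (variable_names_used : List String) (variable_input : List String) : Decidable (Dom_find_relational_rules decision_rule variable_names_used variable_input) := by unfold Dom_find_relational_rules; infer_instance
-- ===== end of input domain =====

-- B merges A's counting loop and conditional second scan into one comprehension (simpler, same cost).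

-- ===== PORT A =====
def find_relational_rules (decision_rule : String) (variable_names_used : List String) (variable_input : List String) : List String × Bool :=
  -- first loop: count matches, latching `found` as soon as count > 1
  let st := variable_input.foldl (fun (st : Bool × Int) v =>
      let count := if PySem.Str.isIn v decision_rule then st.2 + 1 else st.2
      let found := if count > 1 then true else st.1
      (found, count)) (false, 0)
  let found := st.1
  -- conditional second loop: rebuild the list of matches
  let all_variables := if found then
      variable_input.foldl (fun acc v => if PySem.Str.isIn v decision_rule then acc ++ [v] else acc) []
    else []
  (all_variables, found)

-- ===== PORT B =====
def find_relational_rules_alt (decision_rule : String) (variable_names_used : List String) (variable_input : List String) : List String × Bool :=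
  let ms := variable_input.filter (fun v => PySem.Str.isIn v decision_rule)
  if ms.length > 1 then (ms, true) else ([], false)

-- ===== PRECONDITION & SPEC =====
def Spec_find_relational_rules (decision_rule : String) (variable_names_used : List String) (variable_input : List String) (out : List String × Bool) : Prop := out = find_relational_rules_alt decision_rule variable_names_used variable_input
instance (decision_rule : String) (variable_names_used : List String) (variable_input : List String) (out : List String × Bool) : Decidable (Spec_find_relational_rules decision_rule variable_names_used variable_input out) := by unfold Spec_find_relational_rules; infer_instance

-- ===== CLAIM (what is proved, stated in full; the proofs are below) =====
def Claim_equal_find_relational_rules : Prop := ∀ (decision_rule : String) (variable_names_used : List String) (variable_input : List String), Dom_find_relational_rules decision_rule variable_names_used variable_input → Spec_find_relational_rules decision_rule variable_names_used variable_input (find_relational_rules decision_rule variable_names_used variable_input)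

-- ===== LEMMAS AND PROOFS =====

-- A's first loop: the count is the number of matches, and `found` latches iff the count exceeds 1.
theorem pv_countLoop (p : String → Bool) (l : List String) (f : Bool) (c : Int)
    (hc : 0 ≤ c) (hf : 1 < c → f = true) :
    l.foldl (fun (st : Bool × Int) v =>
      let count := if p v then st.2 + 1 else st.2
      let found := if count > 1 then true else st.1
      (found, count)) (f, c)
    = (f || decide (1 < c + (l.countP p : Int)), c + (l.countP p : Int)) := by
  induction l generalizing f c with
  | nil =>
    simp only [List.foldl_nil, List.countP_nil, Nat.cast_zero, add_zero]
    by_cases h : (1:Int) < c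
    · simp [hf h, h]
    · simp [h]
  | cons x xs ih =>
    have hn : (0:Int) ≤ (xs.countP p : Int) := Int.natCast_nonneg _
    simp only [List.foldl_cons, List.countP_cons]
    by_cases hx : p x
    · simp only [if_pos hx]
      rw [ih (if c + 1 > 1 then true else f) (c + 1) (by omega) (by intro h; simp [h])]
      have e : c + ((xs.countP p + 1 : Nat) : Int) = (c + 1) + (xs.countP p : Int) := by
        push_cast; ring
      rw [e]
      simp only [Prod.mk.injEq, and_true]
      by_cases h1 : c + 1 > 1
      · have h2 : 1 < (c + 1) + (xs.countP p : Int) := by omega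
        simp [h1, h2]
      · simp [h1]
    · simp only [if_neg hx]
      rw [ih (if c > 1 then true else f) c hc (by intro h; simp [h])]
      simp only [Nat.add_zero, Prod.mk.injEq, and_true]
      by_cases h1 : c > 1
      · have h2 : 1 < c + (xs.countP p : Int) := by omega
        simp [h1, h2]
      · simp [h1]

-- A's second loop builds exactly the filter.
theorem pv_appendLoop (p : String → Bool) (l : List String) (acc : List String) :
    l.foldl (fun acc v => if p v then acc ++ [v] else acc) acc = acc ++ l.filter p := by
  induction l generalizing acc with
  | nil => simp
  | cons x xs ih => by_cases hx : p x <;> simp [hx, ih]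

-- ===== VERDICT (by name: the statement is the Claim_ definition above) =====
theorem find_relational_rules_spec : Claim_equal_find_relational_rules := by
  intro dr vnu vi _
  unfold Spec_find_relational_rules find_relational_rules find_relational_rules_alt
  rw [pv_countLoop (fun v => PySem.Str.isIn v dr) vi false 0 le_rfl (by intro h; omega)]
  simp only [Bool.false_or, Int.zero_add]
  rw [pv_appendLoop (fun v => PySem.Str.isIn v dr) vi [], List.nil_append,
      List.countP_eq_length_filter]
  by_cases h : 1 < (vi.filter (fun v => PySem.Chars.isIn v.toList dr.toList)).length
  · simp [h]
  · simp [h]
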